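-- pv_equiv track=rewrite | github.com/f-laplagne/swarm-pdf-extract | scripts/benchmark_ocr.py | count_tables_in_text
-- ===== SOURCE A (Python) =====
-- def count_tables_in_text(text: str) -> int:
--     """Compte les tableaux Markdown détectés dans le texte."""
--     lines = text.split("\n")
--     table_count = 0
--     in_table = False
--     for line in lines:
--         stripped = line.strip()
--         if "|" in stripped and stripped.startswith("|"):
--             if not in_table:
--                 table_count += 1
--                 in_table = True
--         else:
--             in_table = False
--     return table_count
-- ===== SOURCE B (Python) =====
-- def count_tables_in_text(text: str) -> int:
--     """Compte les tableaux Markdown detectes dans le texte."""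
--     flags = [line.strip().startswith("|") for line in text.split("\n")]
--     return sum(1 for prev, cur in zip([False] + flags, flags) if cur and not prev)
-- ===== Notes on version B (the rewrite author's own statement) =====
-- stated objective: simpler
-- what changed: Replaces the stateful in_table loop by a per-line flag list and a rising-edge count over adjacent flag pairs, dropping the redundant substring-containment test (a stripped line that starts with a pipe necessarily contains one).
import Mathlib
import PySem

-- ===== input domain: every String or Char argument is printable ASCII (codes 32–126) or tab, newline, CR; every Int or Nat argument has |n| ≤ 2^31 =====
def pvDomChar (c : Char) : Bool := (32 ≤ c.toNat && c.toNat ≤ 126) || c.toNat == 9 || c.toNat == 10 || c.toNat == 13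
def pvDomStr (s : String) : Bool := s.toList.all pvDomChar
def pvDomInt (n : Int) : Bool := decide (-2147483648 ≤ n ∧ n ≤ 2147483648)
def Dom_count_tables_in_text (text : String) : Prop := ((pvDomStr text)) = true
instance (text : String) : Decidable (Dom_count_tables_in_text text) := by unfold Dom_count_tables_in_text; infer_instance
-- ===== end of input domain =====

-- B replaces A's stateful in_table loop by a per-line flag list and a rising-edge count
-- over adjacent flag pairs, dropping the redundant substring-containment test (simpler).

-- ===== PORT A =====
-- A's loop body (one line of the for-loop), kept as a helper for the fold.
def pvStepA (st : Int × Bool) (line : String) : Int × Bool :=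
  if PySem.Str.isIn "|" (PySem.Str.strip line) && PySem.Str.startswith (PySem.Str.strip line) "|" then
    (if !st.2 then st.1 + 1 else st.1, true)
  else (st.1, false)

def count_tables_in_text (text : String) : Int :=
  let lines := (PySem.Str.split? text "\n").getD []
  (lines.foldl pvStepA (0, false)).1

-- ===== PORT B =====
def count_tables_in_text_alt (text : String) : Int :=
  let flags := ((PySem.Str.split? text "\n").getD []).map
    (fun line => PySem.Str.startswith (PySem.Str.strip line) "|")
  ((List.zip (false :: flags) flags).countP (fun p => p.2 && !p.1) : Int)

-- ===== PRECONDITION & SPEC =====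
def Spec_count_tables_in_text (text : String) (out : Int) : Prop := out = count_tables_in_text_alt text
instance (text : String) (out : Int) : Decidable (Spec_count_tables_in_text text out) := by unfold Spec_count_tables_in_text; infer_instance

-- ===== CLAIM (what is proved, stated in full; the proofs are below) =====
def Claim_equal_count_tables_in_text : Prop := ∀ (text : String), Dom_count_tables_in_text text → Spec_count_tables_in_text text (count_tables_in_text text)

-- ===== LEMMAS AND PROOFS =====

-- A's line test equals B's: a string starting with "|" necessarily contains "|".
lemma pred_eq (s : String) :
    (PySem.Str.isIn "|" s && PySem.Str.startswith s "|")
      = PySem.Str.startswith s "|" := by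
  cases h : PySem.Str.startswith s "|" with
  | false => rw [Bool.and_false]
  | true =>
    have hin : PySem.Str.isIn "|" s = true := by
      rw [PySem.Str.isIn_iff_infix]
      exact ((PySem.Chars.startswith_iff s.toList "|".toList).mp (by simpa using h)).isInfix
    rw [Bool.and_true]; exact hin

-- One step of A's loop: add 1 on a rising edge, remember the current flag.
lemma stepA_eq (st : Int × Bool) (l : String) :
    pvStepA st l
      = (st.1 + (if PySem.Str.startswith (PySem.Str.strip l) "|" && !st.2 then 1 else 0),
         PySem.Str.startswith (PySem.Str.strip l) "|") := by
  unfold pvStepA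
  rw [pred_eq]
  cases hf : PySem.Str.startswith (PySem.Str.strip l) "|" <;> cases hb : st.2 <;> simp

-- Loop invariant: A's fold from state (c, b) adds the number of rising edges of the
-- flag sequence with previous flag b.
lemma loop_eq (lines : List String) (c : Int) (b : Bool) :
    (lines.foldl pvStepA (c, b)).1
    = c + ((List.zip (b :: lines.map (fun l => PySem.Str.startswith (PySem.Str.strip l) "|"))
              (lines.map (fun l => PySem.Str.startswith (PySem.Str.strip l) "|"))).countP
              (fun p => p.2 && !p.1) : Int) := by
  induction lines generalizing c b with
  | nil => simp
  | cons l rest ih =>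
    rw [List.foldl_cons, stepA_eq, ih]
    simp only [List.map_cons, List.zip_cons_cons, List.countP_cons]
    cases hf : PySem.Str.startswith (PySem.Str.strip l) "|" <;> cases b <;> simp <;> ring

-- ===== VERDICT (by name: the statement is the Claim_ definition above) =====
theorem count_tables_in_text_spec : Claim_equal_count_tables_in_text := by
  intro text _
  unfold Spec_count_tables_in_text count_tables_in_text count_tables_in_text_alt
  rw [loop_eq]
  ring
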